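-- pv_equiv track=rewrite | github.com/IncognitoPeter/informatyka_korki | zestaw_1/lvl2/zadanie_9.py | sprawdz_czy_cyfra_rowna_liczbie_cyfr
-- ===== SOURCE A (Python) =====
-- def sprawdz_czy_cyfra_rowna_liczbie_cyfr(liczba):
--     ilosc = 0
--     liczba_pom=liczba
--     while liczba_pom > 0:
--         ilosc +=1
--         liczba_pom = liczba_pom // 10
--     while liczba > 0:
--         if liczba % 10 == ilosc:
--             return True
--         liczba = liczba // 10
--     return False
-- ===== SOURCE B (Python) =====
-- def sprawdz_czy_cyfra_rowna_liczbie_cyfr(liczba):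
--     if liczba <= 0:
--         return False
--     s = str(liczba)
--     n = len(s)
--     # a single digit can never equal a count of 10 or more
--     return n <= 9 and str(n) in s
-- ===== Notes on version B (the rewrite author's own statement) =====
-- stated objective: idiomatic
-- what changed: Replaces A's two divmod-by-10 loops (count digits, then scan digits comparing each to the count) with a single substring membership test: B never extracts or compares digits, it checks str(len(s)) in s on s = str(liczba), guarded by the count itself being a single digit since no digit can equal a larger count.
import Mathlib
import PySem

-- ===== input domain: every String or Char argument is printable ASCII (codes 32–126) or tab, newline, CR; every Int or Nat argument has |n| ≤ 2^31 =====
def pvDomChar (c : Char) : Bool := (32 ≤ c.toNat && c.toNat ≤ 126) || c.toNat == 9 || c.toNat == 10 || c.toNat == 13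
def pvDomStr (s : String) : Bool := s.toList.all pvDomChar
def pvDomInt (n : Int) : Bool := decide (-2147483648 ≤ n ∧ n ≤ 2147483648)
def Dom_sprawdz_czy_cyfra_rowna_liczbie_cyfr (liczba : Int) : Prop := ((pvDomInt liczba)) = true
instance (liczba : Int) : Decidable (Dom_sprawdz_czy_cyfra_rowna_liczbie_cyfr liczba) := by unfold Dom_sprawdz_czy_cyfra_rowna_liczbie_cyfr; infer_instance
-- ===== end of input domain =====

-- B replaces A's two divmod-by-10 loops by one substring membership test: with s = str(liczba),
-- B returns true iff the count is a single digit and its character occurs in s; same cost, equal on Dom.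


-- termination helper for the two while-loops (n // 10 shrinks while n > 0)
theorem pvFloordivTen_toNat_lt (n : Int) (h : n > 0) :
    (PySem.Int.floordiv n 10).toNat < n.toNat := by
  rw [PySem.Int.floordiv_eq_ediv_of_pos (by norm_num)]
  omega

-- ===== PORT A =====
-- first while-loop: ilosc accumulates the digit count while liczba_pom > 0
def pvCountLoop (liczba_pom : Int) (ilosc : Int) : Int :=
  if h : liczba_pom > 0 then
    pvCountLoop (PySem.Int.floordiv liczba_pom 10) (ilosc + 1)
  else ilosc
termination_by liczba_pom.toNat
decreasing_by exact pvFloordivTen_toNat_lt _ h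

-- second while-loop: return True as soon as liczba % 10 == ilosc
def pvScanLoop (liczba : Int) (ilosc : Int) : Bool :=
  if h : liczba > 0 then
    if PySem.Int.mod liczba 10 == ilosc then true
    else pvScanLoop (PySem.Int.floordiv liczba 10) ilosc
  else false
termination_by liczba.toNat
decreasing_by exact pvFloordivTen_toNat_lt _ h

def sprawdz_czy_cyfra_rowna_liczbie_cyfr (liczba : Int) : Bool :=
  pvScanLoop liczba (pvCountLoop liczba 0)

-- ===== PORT B =====
def sprawdz_czy_cyfra_rowna_liczbie_cyfr_alt (liczba : Int) : Bool :=
  if liczba ≤ 0 then false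
  else
    let s := PySem.Int.toStr liczba
    let n := PySem.Str.len s
    -- n <= 9 and str(n) in s
    decide (n ≤ 9) && PySem.Str.isIn (PySem.Int.toStr n) s

-- ===== PRECONDITION & SPEC =====
def Spec_sprawdz_czy_cyfra_rowna_liczbie_cyfr (liczba : Int) (out : Bool) : Prop := out = sprawdz_czy_cyfra_rowna_liczbie_cyfr_alt liczba
instance (liczba : Int) (out : Bool) : Decidable (Spec_sprawdz_czy_cyfra_rowna_liczbie_cyfr liczba out) := by unfold Spec_sprawdz_czy_cyfra_rowna_liczbie_cyfr; infer_instance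

-- ===== CLAIM (what is proved, stated in full; the proofs are below) =====
def Claim_equal_sprawdz_czy_cyfra_rowna_liczbie_cyfr : Prop := ∀ (liczba : Int), Dom_sprawdz_czy_cyfra_rowna_liczbie_cyfr liczba → Spec_sprawdz_czy_cyfra_rowna_liczbie_cyfr liczba (sprawdz_czy_cyfra_rowna_liczbie_cyfr liczba)

-- ===== LEMMAS AND PROOFS =====

-- A's count loop computes acc + (number of base-10 digits of liczba_pom.toNat)
theorem pvCountLoop_eq (m : Nat) : ∀ (n : Int), n.toNat = m → ∀ acc : Int,
    pvCountLoop n acc = acc + ((Nat.digits 10 n.toNat).length : Int) := by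
  induction m using Nat.strong_induction_on with
  | _ m ih =>
    intro n hm acc
    rw [pvCountLoop]
    by_cases h : n > 0
    · have hn : n = ((n.toNat : Nat) : Int) := by omega
      have h0 : 0 < n.toNat := by omega
      have hfd : PySem.Int.floordiv n 10 = ((n.toNat / 10 : Nat) : Int) := by
        rw [hn]; exact_mod_cast PySem.Int.floordiv_natCast n.toNat 10
      rw [dif_pos h, hfd,
        ih (n.toNat / 10) (by omega) ((n.toNat / 10 : Nat) : Int) (by omega) (acc + 1),
        Nat.digits_def' (by norm_num : (1:Nat) < 10) h0]
      simp only [Int.toNat_natCast, List.length_cons]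
      push_cast
      ring
    · rw [dif_neg h]
      have : n.toNat = 0 := by omega
      simp [this]

-- A's scan loop tests whether some base-10 digit of liczba.toNat equals ilosc
theorem pvScanLoop_eq (m : Nat) : ∀ (n : Int), n.toNat = m → ∀ c : Int,
    pvScanLoop n c = (Nat.digits 10 n.toNat).any (fun d => ((d : Int) == c)) := by
  induction m using Nat.strong_induction_on with
  | _ m ih =>
    intro n hm c
    rw [pvScanLoop]
    by_cases h : n > 0
    · have hn : n = ((n.toNat : Nat) : Int) := by omega
      have h0 : 0 < n.toNat := by omega
      have hfd : PySem.Int.floordiv n 10 = ((n.toNat / 10 : Nat) : Int) := by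
        rw [hn]; exact_mod_cast PySem.Int.floordiv_natCast n.toNat 10
      have hmod : PySem.Int.mod n 10 = ((n.toNat % 10 : Nat) : Int) := by
        rw [hn]; exact_mod_cast PySem.Int.mod_natCast n.toNat 10
      rw [dif_pos h, hmod, hfd,
        ih (n.toNat / 10) (by omega) ((n.toNat / 10 : Nat) : Int) (by omega) c,
        Nat.digits_def' (by norm_num : (1:Nat) < 10) h0]
      simp only [Int.toNat_natCast, List.any_cons]
      show (if ((n.toNat % 10 : Nat) : Int) == c then true
            else (Nat.digits 10 (n.toNat / 10)).any fun d => ((d : Int) == c)) = _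
      by_cases hb : ((n.toNat % 10 : Nat) : Int) = c
      · rw [if_pos (by rw [beq_iff_eq]; exact hb)]
        simp [hb]
      · rw [if_neg (by rw [beq_iff_eq]; exact hb)]
        rw [beq_eq_false_iff_ne.mpr hb, Bool.false_or]
    · rw [dif_neg h]
      have : n.toNat = 0 := by omega
      simp [this]

-- Nat.toDigits 10 m is the digit list of m, most significant first, as characters
theorem toDigitsCore_eq (f : Nat) : ∀ (n : Nat), 0 < n → n < f → ∀ acc : List Char,
    Nat.toDigitsCore 10 f n acc = ((Nat.digits 10 n).map Nat.digitChar).reverse ++ acc := by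
  induction f with
  | zero => intro n h0 hf; omega
  | succ f ih =>
    intro n h0 hf acc
    rw [Nat.toDigitsCore]
    by_cases hd : n / 10 = 0
    · simp only [hd, if_true]
      rw [Nat.digits_def' (by norm_num : (1:Nat) < 10) h0,
        Nat.digits_eq_nil_iff_eq_zero.mpr hd]
      simp
    · simp only [hd, if_false]
      rw [ih (n / 10) (by omega) (by omega),
        Nat.digits_def' (by norm_num : (1:Nat) < 10) h0]
      simp

theorem toDigits_eq (n : Nat) (h0 : 0 < n) :
    Nat.toDigits 10 n = ((Nat.digits 10 n).map Nat.digitChar).reverse := by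
  have := toDigitsCore_eq (n + 1) n h0 (by omega) []
  simpa [Nat.toDigits] using this

-- str(k) for 1 ≤ k ≤ 9 is the single digit character of k
theorem toChars_single (k : Nat) (h1 : 1 ≤ k) (h9 : k ≤ 9) :
    PySem.Int.toChars (k : Int) = [Nat.digitChar k] := by
  interval_cases k <;> decide

theorem digitChar_inj_lt10 (a b : Nat) (ha : a < 10) (hb : b < 10)
    (h : Nat.digitChar a = Nat.digitChar b) : a = b := by
  interval_cases a <;> interval_cases b <;> simp_all <;> revert h <;> decide

-- singleton infix iff membership
theorem singleton_infix_iff {α : Type} (a : α) (l : List α) : [a] <:+: l ↔ a ∈ l := by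
  constructor
  · rintro ⟨s, t, rfl⟩; simp
  · intro h
    obtain ⟨s, t, rfl⟩ := List.append_of_mem h
    exact ⟨s, t, by simp⟩

-- ===== VERDICT (by name: the statement is the Claim_ definition above) =====
theorem sprawdz_czy_cyfra_rowna_liczbie_cyfr_spec : Claim_equal_sprawdz_czy_cyfra_rowna_liczbie_cyfr := by
  intro n _
  unfold Spec_sprawdz_czy_cyfra_rowna_liczbie_cyfr
  unfold sprawdz_czy_cyfra_rowna_liczbie_cyfr sprawdz_czy_cyfra_rowna_liczbie_cyfr_alt
  by_cases h : n ≤ 0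
  · rw [if_pos h, pvScanLoop, dif_neg (show ¬ n > 0 from by omega)]
  · rw [if_neg h]
    have h0 : 0 < n.toNat := by omega
    have htc : (PySem.Int.toStr n).toList = Nat.toDigits 10 n.toNat := by
      rw [PySem.Int.toList_toStr, PySem.Int.toChars, if_neg (by omega)]
    rw [pvScanLoop_eq n.toNat n rfl, pvCountLoop_eq n.toNat n rfl]
    set L := Nat.digits 10 n.toNat with hL
    have hlen : PySem.Str.len (PySem.Int.toStr n) = (L.length : Int) := by
      simp only [PySem.Str.len, htc, toDigits_eq n.toNat h0,
        List.length_reverse, List.length_map]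
      rw [hL]
    have hdig : ∀ d ∈ L, d < 10 := fun d hd => Nat.digits_lt_base (by norm_num) hd
    have hL0 : 1 ≤ L.length := by
      have hne : L ≠ [] := Nat.digits_ne_nil_iff_ne_zero.mpr (by omega)
      have := List.length_pos_of_ne_nil hne
      omega
    show _ = (decide (PySem.Str.len (PySem.Int.toStr n) ≤ 9) &&
      PySem.Str.isIn (PySem.Int.toStr (PySem.Str.len (PySem.Int.toStr n)))
        (PySem.Int.toStr n))
    rw [hlen]
    simp only [zero_add]
    by_cases h9 : L.length ≤ 9
    · rw [Bool.and_comm]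
      have hone : (PySem.Int.toStr ((L.length : Nat) : Int)).toList = [Nat.digitChar L.length] := by
        rw [PySem.Int.toList_toStr]
        exact toChars_single L.length hL0 h9
      have hin : PySem.Str.isIn (PySem.Int.toStr ((L.length : Nat) : Int)) (PySem.Int.toStr n)
          = L.any (fun d => ((d : Int) == ((L.length : Nat) : Int))) := by
        by_cases hmem : L.length ∈ L
        · have hsub : PySem.Str.isIn (PySem.Int.toStr ((L.length : Nat) : Int))
              (PySem.Int.toStr n) = true := by
            rw [PySem.Str.isIn_iff_infix, hone, htc, toDigits_eq n.toNat h0,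
              singleton_infix_iff]
            simp only [List.mem_reverse, List.mem_map]
            exact ⟨L.length, hmem, rfl⟩
          rw [hsub]
          symm; rw [List.any_eq_true]
          exact ⟨L.length, hmem, by simp⟩
        · have hsub : PySem.Str.isIn (PySem.Int.toStr ((L.length : Nat) : Int))
              (PySem.Int.toStr n) = false := by
            rw [← Bool.not_eq_true, PySem.Str.isIn_iff_infix, hone, htc,
              toDigits_eq n.toNat h0, singleton_infix_iff]
            simp only [List.mem_reverse, List.mem_map]
            rintro ⟨d, hd, hdc⟩
            exact hmem (digitChar_inj_lt10 d L.length (hdig d hd) (by omega) hdc ▸ hd)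
          rw [hsub]
          symm; rw [List.any_eq_false]
          intro d hd
          rw [beq_iff_eq]
          exact fun he => hmem ((by exact_mod_cast he : d = L.length) ▸ hd)
      rw [hin, decide_eq_true (show ((L.length : Nat) : Int) ≤ 9 by exact_mod_cast h9), Bool.and_true]
    · rw [decide_eq_false (show ¬ ((L.length : Nat) : Int) ≤ 9 by exact_mod_cast h9), Bool.false_and]
      rw [List.any_eq_false]
      intro d hd
      have := hdig d hd
      rw [beq_iff_eq]
      intro he
      have : d = L.length := by exact_mod_cast he
      omega
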